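-- pv_equiv track=rewrite | github.com/teckoo/interview_public | coding/leetcode/1065-index-pairs-of-a-string/solution-fast.py | indexPairs
-- ===== SOURCE A (Python) =====
-- from typing import List
--
-- def indexPairs(text: str, words: List[str]) -> List[List[int]]:
--     res=[]
--     for word in words:
--         for i in range(len(text)-len(word)+1):
--             if text[i:len(word)+i]==word:
--                 res.append([i,i+len(word)-1])
--     res.sort(key=lambda x:(x[0],x[1]))
--     return res
-- ===== SOURCE B (Python) =====
-- from typing import List
--
-- def indexPairs(text: str, words: List[str]) -> List[List[int]]:
--     # Index the words once (multiplicity per word, distinct lengths), then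
--     # scan text positions left to right emitting pairs already in sorted order.
--     counts = {}
--     lengths = []
--     for w in words:
--         if len(w) not in lengths:
--             lengths.append(len(w))
--         counts[w] = counts.get(w, 0) + 1
--     lengths.sort()
--     n = len(text)
--     res = []
--     for i in range(n + 1):
--         for L in lengths:
--             if i + L <= n:
--                 res += [[i, i + L - 1]] * counts.get(text[i:i + L], 0)
--     return res
-- ===== Notes on version B (the rewrite author's own statement) =====
-- stated objective: faster
-- what changed: Instead of scanning the whole text once per word and sorting the collected pairs, B builds a word-multiplicity dictionary and the sorted set of distinct word lengths in one pass over the words, then scans text positions left to right probing only one slice per distinct length, emitting the pairs already in sorted order with no final sort.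
import Mathlib
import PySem

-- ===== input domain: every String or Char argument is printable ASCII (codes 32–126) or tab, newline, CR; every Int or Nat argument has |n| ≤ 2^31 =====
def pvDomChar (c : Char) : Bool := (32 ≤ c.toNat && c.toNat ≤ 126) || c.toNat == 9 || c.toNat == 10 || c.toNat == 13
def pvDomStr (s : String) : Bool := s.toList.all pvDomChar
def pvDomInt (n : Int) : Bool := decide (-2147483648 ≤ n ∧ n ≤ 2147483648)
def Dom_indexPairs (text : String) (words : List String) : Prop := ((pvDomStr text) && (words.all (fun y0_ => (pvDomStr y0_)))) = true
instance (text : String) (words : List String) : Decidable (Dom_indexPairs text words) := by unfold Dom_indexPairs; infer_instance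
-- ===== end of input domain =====

-- B replaces A's brute-force word-by-word scan + final sort by a one-pass word index
-- (multiplicity per word, distinct word lengths) and a single left-to-right scan of the
-- text that emits the pairs already in sorted order (alternative algorithm).

-- ===== PORT A =====
def indexPairs (text : String) (words : List String) : List (List Int) :=
  let res : List (List Int) :=
    words.foldl (fun res word =>
      (PySem.List.pyRange 0 (PySem.Str.len text - PySem.Str.len word + 1)).foldl
        (fun res i =>
          if PySem.Str.slice text (some i) (some (PySem.Str.len word + i)) = word then
            res ++ [[i, i + PySem.Str.len word - 1]]
          else res)
        res)
      []
  PySem.List.sorted2 res (fun x => PySem.List.pyGetD x 0 0) (fun x => PySem.List.pyGetD x 1 0) false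

-- ===== PORT B =====
def indexPairs_alt (text : String) (words : List String) : List (List Int) :=
  let st : PySem.Dict String Int × List Int :=
    words.foldl (fun s w =>
      (s.1.insert w (s.1.getD w 0 + 1),
       if PySem.Str.len w ∈ s.2 then s.2 else s.2 ++ [PySem.Str.len w]))
      (PySem.Dict.empty, [])
  let counts := st.1
  let lengths := PySem.List.sorted st.2 (fun x => x) false
  let n := PySem.Str.len text
  (PySem.List.pyRange 0 (n + 1)).foldl (fun res i =>
    lengths.foldl (fun res L =>
      if i + L ≤ n then
        res ++ PySem.List.pyRepeat [[i, i + L - 1]]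
          (counts.getD (PySem.Str.slice text (some i) (some (i + L))) 0)
      else res) res) []

-- ===== PRECONDITION & SPEC =====
def Spec_indexPairs (text : String) (words : List String) (out : List (List Int)) : Prop := out = indexPairs_alt text words
instance (text : String) (words : List String) (out : List (List Int)) : Decidable (Spec_indexPairs text words out) := by unfold Spec_indexPairs; infer_instance

-- ===== CLAIM (what is proved, stated in full; the proofs are below) =====
def Claim_equal_indexPairs : Prop := ∀ (text : String) (words : List String), Dom_indexPairs text words → Spec_indexPairs text words (indexPairs text words)

-- ===== LEMMAS AND PROOFS =====

-- the comparison sorted2 uses in port A (reverse = false)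
def pvBefore (a b : List Int) : Bool :=
  decide (PySem.List.pyGetD a 0 0 < PySem.List.pyGetD b 0 0) ||
    !decide (PySem.List.pyGetD b 0 0 < PySem.List.pyGetD a 0 0) &&
      decide (PySem.List.pyGetD a 1 0 < PySem.List.pyGetD b 1 0)

-- "a may come before b" — the order sorted2's output is pairwise in
def pvLe (a b : List Int) : Prop := pvBefore b a = false

-- per-word contribution of A at one text position, as a 0/1-element list
def pvG (text : String) (w : String) (i : Int) : List (List Int) :=
  if i + PySem.Str.len w ≤ PySem.Str.len text ∧
      PySem.Str.slice text (some i) (some (PySem.Str.len w + i)) = w then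
    [[i, i + PySem.Str.len w - 1]]
  else []

-- A's list before sorting, as a flatMap
def pvResA (text : String) (words : List String) : List (List Int) :=
  words.flatMap (fun w =>
    ((PySem.List.pyRange 0 (PySem.Str.len text - PySem.Str.len w + 1)).filter
        (fun i => decide (PySem.Str.slice text (some i) (some (PySem.Str.len w + i)) = w))).map
      (fun i => [i, i + PySem.Str.len w - 1]))

-- B's per-(position, length) contribution, counts written out as List.count
def pvH (text : String) (words : List String) (i L : Int) : List (List Int) :=
  if i + L ≤ PySem.Str.len text then
    List.replicate (words.count (PySem.Str.slice text (some i) (some (i + L)))) [i, i + L - 1]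
  else []

def pvLens (words : List String) : List Int :=
  PySem.List.sorted (PySem.Set.ofList (words.map PySem.Str.len)) (fun x => x) false

-- B's output, as a flatMap
def pvResB (text : String) (words : List String) : List (List Int) :=
  (PySem.List.pyRange 0 (PySem.Str.len text + 1)).flatMap (fun i =>
    (pvLens words).flatMap (fun L => pvH text words i L))

lemma pyGetD_pair_zero (p q : Int) : PySem.List.pyGetD [p, q] 0 0 = p := by
  simp [PySem.List.pyGetD, PySem.List.pyGet?, PySem.List.pyIdx?]

lemma pyGetD_pair_one (p q : Int) : PySem.List.pyGetD [p, q] 1 0 = q := by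
  simp [PySem.List.pyGetD, PySem.List.pyGet?, PySem.List.pyIdx?]

lemma pvBefore_asym (a b : List Int) (h : pvBefore a b = true) : pvBefore b a = false := by
  simp only [pvBefore, Bool.or_eq_true, Bool.and_eq_true, Bool.not_eq_true',
    Bool.or_eq_false_iff, Bool.and_eq_false_iff, Bool.not_eq_false',
    decide_eq_true_eq, decide_eq_false_iff_not] at h ⊢
  omega

lemma pvBefore_trans (a b c : List Int) (h1 : pvBefore a b = true) (h2 : pvBefore b c = true) :
    pvBefore a c = true := by
  simp only [pvBefore, Bool.or_eq_true, Bool.and_eq_true, Bool.not_eq_true',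
    decide_eq_true_eq, decide_eq_false_iff_not] at *
  omega

lemma pairwise_insertBy {α : Type} (before : α → α → Bool)
    (hasym : ∀ a b, before a b = true → before b a = false)
    (htrans : ∀ a b c, before a b = true → before b c = true → before a c = true)
    (x : α) (ys : List α) (h : ys.Pairwise (fun a b => before b a = false)) :
    (PySem.List.insertBy before x ys).Pairwise (fun a b => before b a = false) := by
  induction ys with
  | nil => simp [PySem.List.insertBy]
  | cons y ys ih =>
    rw [List.pairwise_cons] at h
    by_cases hxy : before x y = true
    · simp only [PySem.List.insertBy, hxy, if_true]
      refine List.Pairwise.cons ?_ (List.Pairwise.cons h.1 h.2)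
      intro z hz
      rcases List.mem_cons.mp hz with rfl | hz
      · exact hasym _ _ hxy
      · by_cases hzx : before z x = true
        · have := htrans z x y hzx hxy
          rw [h.1 z hz] at this; exact absurd this (by simp)
        · simpa using hzx
    · have hxy' : before x y = false := by simpa using hxy
      simp only [PySem.List.insertBy, hxy, if_false]
      refine List.Pairwise.cons ?_ (ih h.2)
      intro z hz
      rw [PySem.List.mem_insertBy] at hz
      rcases hz with rfl | hz
      · exact hxy'
      · exact h.1 z hz

lemma pairwise_foldl_insertBy {α : Type} (before : α → α → Bool)
    (hasym : ∀ a b, before a b = true → before b a = false)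
    (htrans : ∀ a b c, before a b = true → before b c = true → before a c = true)
    (xs : List α) :
    (xs.foldl (fun acc x => PySem.List.insertBy before x acc) []).Pairwise
      (fun a b => before b a = false) := by
  suffices h : ∀ (acc : List α), acc.Pairwise (fun a b => before b a = false) →
      (xs.foldl (fun acc x => PySem.List.insertBy before x acc) acc).Pairwise
        (fun a b => before b a = false) from h [] (by simp)
  induction xs with
  | nil => intro acc hacc; simpa using hacc
  | cons x t ih =>
    intro acc hacc
    exact ih _ (pairwise_insertBy before hasym htrans x acc hacc)

lemma flatMap_congr_mem {α β : Type} {l : List α} {f g : α → List β}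
    (h : ∀ x ∈ l, f x = g x) : l.flatMap f = l.flatMap g := by
  induction l with
  | nil => rfl
  | cons a t ih =>
    simp only [List.flatMap_cons, h a (by simp), ih (fun x hx => h x (by simp [hx]))]

lemma filter_map_eq_flatMap {α β : Type} (p : α → Prop) [DecidablePred p] (g : α → β)
    (l : List α) :
    (l.filter (fun x => decide (p x))).map g = l.flatMap (fun x => if p x then [g x] else []) := by
  induction l with
  | nil => rfl
  | cons a t ih =>
    by_cases h : p a <;> simp [List.filter_cons, h, ih]

lemma flatMap_if_eq_replicate {α β : Type} [BEq α] [LawfulBEq α] (s : α) (v : β) (l : List α) :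
    l.flatMap (fun w => if w == s then [v] else []) = List.replicate (l.count s) v := by
  induction l with
  | nil => rfl
  | cons a t ih =>
    by_cases h : a = s <;> simp [List.count_cons, h, ih, List.replicate_succ]

lemma flatMap_append_perm {α β : Type} (l : List α) (g h : α → List β) :
    (l.flatMap fun x => g x ++ h x).Perm (l.flatMap g ++ l.flatMap h) := by
  induction l with
  | nil => simp
  | cons a t ih =>
    simp only [List.flatMap_cons]
    refine (ih.append_left (g a ++ h a)).trans ?_
    simp only [List.append_assoc]
    exact ((List.perm_append_comm_assoc _ _ _).append_left _)

lemma flatMap_swap_perm {α β γ : Type} (l₁ : List α) (l₂ : List β) (f : α → β → List γ) :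
    (l₁.flatMap fun a => l₂.flatMap fun b => f a b).Perm
      (l₂.flatMap fun b => l₁.flatMap fun a => f a b) := by
  induction l₁ with
  | nil => simp
  | cons a t ih =>
    simp only [List.flatMap_cons]
    refine ((ih.append_left _).trans ?_)
    exact (flatMap_append_perm l₂ (f a) (fun b => t.flatMap fun a => f a b)).symm

lemma perm_flatMap_filter {α : Type} (key : α → Int) (ks : List Int) (hnd : ks.Nodup) :
    ∀ (l : List α), (∀ x ∈ l, key x ∈ ks) →
      (ks.flatMap fun k => l.filter fun x => key x == k).Perm l := by
  induction ks with
  | nil =>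
    intro l hcov
    have : l = [] := List.eq_nil_iff_forall_not_mem.mpr (fun x hx => by simpa using hcov x hx)
    simp [this]
  | cons k ks ih =>
    intro l hcov
    rw [List.nodup_cons] at hnd
    simp only [List.flatMap_cons]
    have hrw : (ks.flatMap fun k' => l.filter fun x => key x == k') =
        ks.flatMap fun k' => (l.filter fun x => !(key x == k)).filter fun x => key x == k' := by
      refine flatMap_congr_mem (fun k' hk' => ?_)
      rw [List.filter_filter]
      refine (List.filter_congr (fun x _ => ?_)).symm
      by_cases h : key x = k'
      · have hkk : ¬ k' = k := fun hh => hnd.1 (hh ▸ hk')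
        simp [h, hkk]
      · simp [h]
    rw [hrw]
    have hcov' : ∀ x ∈ (l.filter fun x => !(key x == k)), key x ∈ ks := by
      intro x hx
      rw [List.mem_filter] at hx
      have := hcov x hx.1
      rcases List.mem_cons.mp this with h | h
      · exact absurd h (by simpa using hx.2)
      · exact h
    have h2 := ih hnd.2 _ hcov'
    exact (h2.append_left _).trans (List.filter_append_perm _ l)

lemma indexPairs_eq_sorted (text : String) (words : List String) :
    indexPairs text words =
      PySem.List.sorted2 (pvResA text words) (fun x => PySem.List.pyGetD x 0 0)
        (fun x => PySem.List.pyGetD x 1 0) false := by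
  unfold indexPairs
  have h1 : ∀ (res : List (List Int)) (word : String),
      (PySem.List.pyRange 0 (PySem.Str.len text - PySem.Str.len word + 1)).foldl
        (fun res i =>
          if PySem.Str.slice text (some i) (some (PySem.Str.len word + i)) = word then
            res ++ [[i, i + PySem.Str.len word - 1]]
          else res) res
      = res ++ ((PySem.List.pyRange 0 (PySem.Str.len text - PySem.Str.len word + 1)).filter
          (fun i => decide (PySem.Str.slice text (some i) (some (PySem.Str.len word + i)) = word))).map
          (fun i => [i, i + PySem.Str.len word - 1]) :=
    fun res word => PySem.List.foldl_append_ite _ _ _ _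
  simp only [h1]
  rw [PySem.List.foldl_append_eq_flatMap]
  rfl

lemma set_add_eq (acc : List Int) (x : Int) :
    PySem.Set.add acc x = if x ∈ acc then acc else acc ++ [x] := by
  simp [PySem.Set.add, PySem.Set.contains]

lemma lens_fold_eq (words : List String) :
    words.foldl (fun acc w => if PySem.Str.len w ∈ acc then acc else acc ++ [PySem.Str.len w]) [] =
      PySem.Set.ofList (words.map PySem.Str.len) := by
  rw [PySem.Set.ofList_eq_foldl, List.foldl_map]
  exact PySem.List.foldl_congr_mem _ _ _ _ (fun acc w _ => (set_add_eq acc (PySem.Str.len w)).symm)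

lemma indexPairs_alt_eq_resB (text : String) (words : List String) :
    indexPairs_alt text words = pvResB text words := by
  unfold indexPairs_alt
  rw [PySem.List.foldl_prod_mk
    (f := fun (d : PySem.Dict String Int) (w : String) => d.insert w (d.getD w 0 + 1))
    (g := fun (acc : List Int) (w : String) =>
      if PySem.Str.len w ∈ acc then acc else acc ++ [PySem.Str.len w])]
  simp only [lens_fold_eq]
  have hcnt : ∀ s : String,
      (words.foldl (fun (d : PySem.Dict String Int) w => d.insert w (d.getD w 0 + 1))
        PySem.Dict.empty).getD s 0 = (words.count s : Int) := by
    intro s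
    rw [PySem.Dict.getD_foldl_insert_add_one]
    simp [PySem.Dict.getD_empty]
  have h2 : ∀ (res : List (List Int)) (i : Int),
      (pvLens words).foldl (fun res L =>
        if i + L ≤ PySem.Str.len text then
          res ++ PySem.List.pyRepeat [[i, i + L - 1]]
            ((words.foldl (fun (d : PySem.Dict String Int) w => d.insert w (d.getD w 0 + 1))
              PySem.Dict.empty).getD (PySem.Str.slice text (some i) (some (i + L))) 0)
        else res) res
      = res ++ (pvLens words).flatMap (fun L => pvH text words i L) := by
    intro res i
    have h3 : ∀ (res : List (List Int)) (L : Int),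
        (if i + L ≤ PySem.Str.len text then
          res ++ PySem.List.pyRepeat [[i, i + L - 1]]
            ((words.foldl (fun (d : PySem.Dict String Int) w => d.insert w (d.getD w 0 + 1))
              PySem.Dict.empty).getD (PySem.Str.slice text (some i) (some (i + L))) 0)
        else res) = res ++ pvH text words i L := by
      intro res L
      rw [hcnt, PySem.List.pyRepeat_singleton]
      unfold pvH
      split
      · simp
      · simp
    simp only [h3]
    exact PySem.List.foldl_append_eq_flatMap _ _ _
  rw [show PySem.List.sorted (PySem.Set.ofList (words.map PySem.Str.len)) (fun x => x) false
      = pvLens words from rfl]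
  simp only [h2]
  rw [PySem.List.foldl_append_eq_flatMap]
  rfl

lemma len_nonneg (w : String) : 0 ≤ PySem.Str.len w := by
  rw [PySem.Str.len_eq]; exact Int.natCast_nonneg _

lemma pvLens_nodup (words : List String) : (pvLens words).Nodup :=
  (PySem.List.sorted_perm _ _ _).symm.nodup (PySem.Set.nodup_ofList _)

lemma pvLens_mem (words : List String) (w : String) (h : w ∈ words) :
    PySem.Str.len w ∈ pvLens words := by
  unfold pvLens
  rw [PySem.List.mem_sorted, PySem.Set.mem_ofList]
  exact List.mem_map_of_mem h

lemma pvLens_nonneg (words : List String) (L : Int) (h : L ∈ pvLens words) : 0 ≤ L := by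
  unfold pvLens at h
  rw [PySem.List.mem_sorted, PySem.Set.mem_ofList, List.mem_map] at h
  obtain ⟨w, _, rfl⟩ := h
  exact len_nonneg w

lemma slice_len (text : String) (i L : Int) (h0 : 0 ≤ i) (hL : 0 ≤ L)
    (hc : i + L ≤ PySem.Str.len text) :
    PySem.Str.len (PySem.Str.slice text (some i) (some (i + L))) = L := by
  have hn := PySem.Str.len_eq text
  rw [PySem.Str.len_eq, PySem.Str.toList_slice]
  simp only [PySem.Chars.slice_eq_listSlice]
  rw [PySem.List.slice_toNat _ h0 (by omega)]
  simp only [List.length_take, List.length_drop]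
  omega

lemma perWord_eq (text : String) (w : String) :
    ((PySem.List.pyRange 0 (PySem.Str.len text - PySem.Str.len w + 1)).filter
        (fun i => decide (PySem.Str.slice text (some i) (some (PySem.Str.len w + i)) = w))).map
      (fun i => [i, i + PySem.Str.len w - 1])
    = (PySem.List.pyRange 0 (PySem.Str.len text + 1)).flatMap (fun i => pvG text w i) := by
  rw [filter_map_eq_flatMap]
  have hn0 : 0 ≤ PySem.Str.len text := len_nonneg text
  have hm0 : 0 ≤ PySem.Str.len w := len_nonneg w
  by_cases hm : PySem.Str.len w ≤ PySem.Str.len text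
  · rw [PySem.List.pyRange_one_append 0 (PySem.Str.len text - PySem.Str.len w + 1)
      (PySem.Str.len text + 1) (by omega) (by omega), List.flatMap_append]
    have h2 : (PySem.List.pyRange (PySem.Str.len text - PySem.Str.len w + 1)
        (PySem.Str.len text + 1)).flatMap (fun i => pvG text w i) = [] := by
      rw [flatMap_congr_mem (g := fun _ => ([] : List (List Int))) (fun i hi => ?_)]
      · simp
      · rw [PySem.List.mem_pyRange_one] at hi
        unfold pvG
        rw [if_neg]
        rintro ⟨h, -⟩
        omega
    rw [h2, List.append_nil]
    refine flatMap_congr_mem (fun i hi => ?_)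
    rw [PySem.List.mem_pyRange_one] at hi
    have hc : i + PySem.Str.len w ≤ PySem.Str.len text := by omega
    unfold pvG
    simp only [hc, true_and]
  · have hnil : PySem.Str.len text - PySem.Str.len w + 1 ≤ 0 := by omega
    rw [PySem.List.pyRange_one_eq_nil hnil]
    symm
    rw [flatMap_congr_mem (g := fun _ => ([] : List (List Int))) (fun i hi => ?_)]
    · simp
    · rw [PySem.List.mem_pyRange_one] at hi
      unfold pvG
      rw [if_neg]
      rintro ⟨h, -⟩
      omega

lemma group_eq (text : String) (words : List String) (i L : Int)
    (h0 : 0 ≤ i) (hL0 : 0 ≤ L) :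
    (words.filter (fun w => PySem.Str.len w == L)).flatMap (fun w => pvG text w i) =
      pvH text words i L := by
  by_cases hc : i + L ≤ PySem.Str.len text
  · have hstep : ∀ w ∈ words.filter (fun w => PySem.Str.len w == L),
        pvG text w i =
          if w == PySem.Str.slice text (some i) (some (i + L)) then [[i, i + L - 1]] else [] := by
      intro w hw
      rw [List.mem_filter] at hw
      have hlw : PySem.Str.len w = L := by simpa using hw.2
      unfold pvG
      rw [hlw, show L + i = i + L from by ring]
      simp only [hc, true_and]
      by_cases he : PySem.Str.slice text (some i) (some (i + L)) = w
      · have hb : (w == PySem.Str.slice text (some i) (some (i + L))) = true :=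
          beq_iff_eq.mpr he.symm
        simp [he, hb]
      · have hb : (w == PySem.Str.slice text (some i) (some (i + L))) = false := by
          simp only [beq_eq_false_iff_ne, ne_eq]
          exact fun hh => he hh.symm
        simp [he, hb]
    rw [flatMap_congr_mem hstep, flatMap_if_eq_replicate]
    unfold pvH
    rw [if_pos hc]
    congr 1
    exact List.count_filter (by rw [beq_iff_eq]; exact slice_len text i L h0 hL0 hc)
  · rw [flatMap_congr_mem (g := fun _ => ([] : List (List Int))) (fun w hw => ?_)]
    · unfold pvH
      rw [if_neg hc]
      simp
    · rw [List.mem_filter] at hw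
      have hlw : PySem.Str.len w = L := by simpa using hw.2
      unfold pvG
      rw [if_neg]
      rintro ⟨h, -⟩
      rw [hlw] at h
      exact hc h

lemma inner_perm (text : String) (words : List String) (i : Int) (h0 : 0 ≤ i) :
    (words.flatMap fun w => pvG text w i).Perm
      ((pvLens words).flatMap fun L => pvH text words i L) := by
  have hg := (perm_flatMap_filter PySem.Str.len (pvLens words) (pvLens_nodup words) words
    (fun w hw => pvLens_mem words w hw)).symm
  refine (List.Perm.flatMap hg (fun a _ => List.Perm.refl _)).trans ?_
  rw [List.flatMap_assoc]
  exact List.Perm.of_eq (flatMap_congr_mem (fun L hL =>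
    group_eq text words i L h0 (pvLens_nonneg words L hL)))

lemma resA_perm_resB (text : String) (words : List String) :
    (pvResA text words).Perm (pvResB text words) := by
  unfold pvResA pvResB
  rw [flatMap_congr_mem (fun w _ => perWord_eq text w)]
  refine (flatMap_swap_perm words (PySem.List.pyRange 0 (PySem.Str.len text + 1))
    (fun w i => pvG text w i)).trans ?_
  refine List.Perm.flatMap (List.Perm.refl _) (fun i hi => ?_)
  rw [PySem.List.mem_pyRange_one] at hi
  exact inner_perm text words i hi.1

lemma mem_pvH (text : String) (words : List String) (i L : Int) (x : List Int)
    (h : x ∈ pvH text words i L) : x = [i, i + L - 1] := by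
  unfold pvH at h
  split at h
  · exact (List.mem_replicate.mp h).2
  · simp at h

lemma resB_shape (text : String) (words : List String) :
    ∀ x ∈ pvResB text words, ∃ p q : Int, x = [p, q] := by
  intro x hx
  unfold pvResB at hx
  simp only [List.mem_flatMap] at hx
  obtain ⟨i, -, L, -, hx⟩ := hx
  exact ⟨i, i + L - 1, mem_pvH text words i L x hx⟩

lemma pvLe_pair (p q p' q' : Int) (h : p < p' ∨ (p = p' ∧ q ≤ q')) :
    pvLe [p, q] [p', q'] := by
  simp only [pvLe, pvBefore, pyGetD_pair_zero, pyGetD_pair_one, Bool.or_eq_false_iff,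
    Bool.and_eq_false_iff, Bool.not_eq_false', decide_eq_true_eq, decide_eq_false_iff_not]
  omega

lemma chunk_fst (text : String) (words : List String) (i : Int) (x : List Int)
    (h : x ∈ (pvLens words).flatMap fun L => pvH text words i L) :
    ∃ q : Int, x = [i, q] := by
  rw [List.mem_flatMap] at h
  obtain ⟨L, -, h⟩ := h
  exact ⟨i + L - 1, mem_pvH text words i L x h⟩

lemma resB_pairwise (text : String) (words : List String) :
    (pvResB text words).Pairwise pvLe := by
  unfold pvResB
  rw [List.flatMap_def, List.pairwise_flatten]
  constructor
  · intro l hl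
    rw [List.mem_map] at hl
    obtain ⟨i, -, rfl⟩ := hl
    rw [List.flatMap_def, List.pairwise_flatten]
    constructor
    · intro l2 hl2
      rw [List.mem_map] at hl2
      obtain ⟨L, -, rfl⟩ := hl2
      unfold pvH
      split
      · rw [List.pairwise_replicate]
        exact Or.inr (pvLe_pair i (i + L - 1) i (i + L - 1) (Or.inr ⟨rfl, le_refl _⟩))
      · simp
    · rw [List.pairwise_map]
      have hlt : (pvLens words).Pairwise (· < ·) := PySem.List.sorted_ofList_pairwise_lt _
      refine hlt.imp (fun {L1 L2} h12 x hx y hy => ?_)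
      rw [mem_pvH text words i L1 x hx, mem_pvH text words i L2 y hy]
      exact pvLe_pair _ _ _ _ (Or.inr ⟨rfl, by omega⟩)
  · rw [List.pairwise_map]
    have hlt := PySem.List.pairwise_lt_pyRange_one 0 (PySem.Str.len text + 1)
    refine hlt.imp (fun {i1 i2} h12 x hx y hy => ?_)
    obtain ⟨q, rfl⟩ := chunk_fst text words i1 x hx
    obtain ⟨q', rfl⟩ := chunk_fst text words i2 y hy
    exact pvLe_pair _ _ _ _ (Or.inl h12)

lemma sorted2_eq_insertBy (res : List (List Int)) :
    PySem.List.sorted2 res (fun x => PySem.List.pyGetD x 0 0)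
        (fun x => PySem.List.pyGetD x 1 0) false =
      res.foldl (fun acc x => PySem.List.insertBy pvBefore x acc) [] := rfl

-- ===== VERDICT (by name: the statement is the Claim_ definition above) =====
theorem indexPairs_spec : Claim_equal_indexPairs := by
  intro text words _
  show indexPairs text words = indexPairs_alt text words
  rw [indexPairs_eq_sorted, indexPairs_alt_eq_resB, sorted2_eq_insertBy]
  have hperm : (pvResA text words).Perm (pvResB text words) := resA_perm_resB text words
  have hsortedA :
      ((pvResA text words).foldl (fun acc x => PySem.List.insertBy pvBefore x acc) []).Pairwise pvLe :=
    pairwise_foldl_insertBy pvBefore pvBefore_asym pvBefore_trans _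
  have hpermA :
      ((pvResA text words).foldl (fun acc x => PySem.List.insertBy pvBefore x acc) []).Perm
        (pvResA text words) := by
    have := PySem.List.sorted2_perm (pvResA text words)
      (fun x => PySem.List.pyGetD x 0 0) (fun x => PySem.List.pyGetD x 1 0) false
    rwa [sorted2_eq_insertBy] at this
  refine List.Perm.eq_of_sorted ?_ hsortedA (resB_pairwise text words) (hpermA.trans hperm)
  intro a b ha hb h1 h2
  obtain ⟨p, q, rfl⟩ := resB_shape text words a ((hperm.mem_iff).mp ((hpermA.mem_iff).mp ha))
  obtain ⟨p', q', rfl⟩ := resB_shape text words b hb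
  simp only [pvLe, pvBefore, pyGetD_pair_zero, pyGetD_pair_one, Bool.or_eq_false_iff,
    Bool.and_eq_false_iff, Bool.not_eq_false', decide_eq_true_eq,
    decide_eq_false_iff_not] at h1 h2
  have : p = p' ∧ q = q' := by omega
  simp [this.1, this.2]
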